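-- pv_equiv track=rewrite | github.com/nicoddemus/pyuca | pyuca/collator.py | sort_key_from_collation_elements
-- ===== SOURCE A (Python) =====
-- def sort_key_from_collation_elements(collation_elements):
--     sort_key = []
--
--     for level in range(4):
--         if level:
--             sort_key.append(0)  # level separator
--         for element in collation_elements:
--             ce_l = element[level]
--             if ce_l:
--                 sort_key.append(ce_l)
--
--     return tuple(sort_key)
-- ===== SOURCE B (Python) =====
-- def sort_key_from_collation_elements(collation_elements):
--     b0, b1, b2, b3 = [], [], [], []
--     for e in collation_elements:
--         if e[0]:
--             b0.append(e[0])
--         if e[1]: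
--             b1.append(e[1])
--         if e[2]:
--             b2.append(e[2])
--         if e[3]:
--             b3.append(e[3])
--     return tuple(b0 + [0] + b1 + [0] + b2 + [0] + b3)
-- ===== Notes on version B (the rewrite author's own statement) =====
-- stated objective: alternative
-- what changed: Single pass over the elements distributing each nonzero level into four per-level bucket lists, concatenated with separators at the end, instead of A's outer loop over the four levels each rescanning the whole list.
import Mathlib
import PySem

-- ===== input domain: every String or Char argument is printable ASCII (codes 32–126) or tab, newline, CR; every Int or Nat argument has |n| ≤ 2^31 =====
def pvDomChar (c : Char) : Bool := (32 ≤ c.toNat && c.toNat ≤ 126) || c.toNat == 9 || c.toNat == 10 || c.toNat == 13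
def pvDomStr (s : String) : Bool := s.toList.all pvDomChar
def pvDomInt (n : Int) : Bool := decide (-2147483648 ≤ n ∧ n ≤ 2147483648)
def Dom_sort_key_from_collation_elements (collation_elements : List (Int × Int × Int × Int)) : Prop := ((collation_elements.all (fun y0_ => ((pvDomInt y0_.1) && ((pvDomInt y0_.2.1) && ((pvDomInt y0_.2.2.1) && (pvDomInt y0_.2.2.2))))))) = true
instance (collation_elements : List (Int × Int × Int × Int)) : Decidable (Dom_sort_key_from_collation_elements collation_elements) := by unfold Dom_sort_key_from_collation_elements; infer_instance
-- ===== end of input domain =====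

-- B replaces A's four-level outer loop (each level rescanning the list) by one pass distributing
-- each nonzero level value into four buckets, concatenated with separators at the end (alternative decomposition).

-- ===== PORT A =====
-- element[level] on a 4-tuple: level is always 0..3 here (A indexes with range(4))
def pvLevel (e : Int × Int × Int × Int) (level : Int) : Int :=
  if level = 0 then e.1 else if level = 1 then e.2.1 else if level = 2 then e.2.2.1 else e.2.2.2

-- the inner 'for element in collation_elements' loop of A
def pvInner (ces : List (Int × Int × Int × Int)) (level : Int) (sk : List Int) : List Int :=
  ces.foldl (fun sk e => let ce_l := pvLevel e level; if ce_l ≠ 0 then sk ++ [ce_l] else sk) sk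

def sort_key_from_collation_elements (collation_elements : List (Int × Int × Int × Int)) : List Int :=
  (PySem.List.pyRange 0 4 1).foldl (fun sk level =>
    let sk := if level ≠ 0 then sk ++ [0] else sk
    pvInner collation_elements level sk) []

-- ===== PORT B =====
def sort_key_from_collation_elements_alt (collation_elements : List (Int × Int × Int × Int)) : List Int :=
  let b := collation_elements.foldl
    (fun (b : List Int × List Int × List Int × List Int) e =>
      (if e.1 ≠ 0 then b.1 ++ [e.1] else b.1,
       if e.2.1 ≠ 0 then b.2.1 ++ [e.2.1] else b.2.1,
       if e.2.2.1 ≠ 0 then b.2.2.1 ++ [e.2.2.1] else b.2.2.1,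
       if e.2.2.2 ≠ 0 then b.2.2.2 ++ [e.2.2.2] else b.2.2.2))
    ([], [], [], [])
  b.1 ++ [0] ++ b.2.1 ++ [0] ++ b.2.2.1 ++ [0] ++ b.2.2.2

-- ===== PRECONDITION & SPEC =====
def Spec_sort_key_from_collation_elements (collation_elements : List (Int × Int × Int × Int)) (out : List Int) : Prop := out = sort_key_from_collation_elements_alt collation_elements
instance (collation_elements : List (Int × Int × Int × Int)) (out : List Int) : Decidable (Spec_sort_key_from_collation_elements collation_elements out) := by unfold Spec_sort_key_from_collation_elements; infer_instance

-- ===== CLAIM (what is proved, stated in full; the proofs are below) =====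
def Claim_equal_sort_key_from_collation_elements : Prop := ∀ (collation_elements : List (Int × Int × Int × Int)), Dom_sort_key_from_collation_elements collation_elements → Spec_sort_key_from_collation_elements collation_elements (sort_key_from_collation_elements collation_elements)

-- ===== LEMMAS AND PROOFS =====

-- ===== VERDICT (by name: the statement is the Claim_ definition above) =====
-- B's bucket fold, named for the proofs
def pvBuckets (ces : List (Int × Int × Int × Int)) (b : List Int × List Int × List Int × List Int) :
    List Int × List Int × List Int × List Int :=
  ces.foldl
    (fun (b : List Int × List Int × List Int × List Int) e =>
      (if e.1 ≠ 0 then b.1 ++ [e.1] else b.1,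
       if e.2.1 ≠ 0 then b.2.1 ++ [e.2.1] else b.2.1,
       if e.2.2.1 ≠ 0 then b.2.2.1 ++ [e.2.2.1] else b.2.2.1,
       if e.2.2.2 ≠ 0 then b.2.2.2 ++ [e.2.2.2] else b.2.2.2)) b

lemma pvBuckets_eq (ces : List (Int × Int × Int × Int)) (b : List Int × List Int × List Int × List Int) :
    pvBuckets ces b = (pvInner ces 0 b.1, pvInner ces 1 b.2.1, pvInner ces 2 b.2.2.1, pvInner ces 3 b.2.2.2) := by
  induction ces generalizing b with
  | nil => simp [pvBuckets, pvInner]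
  | cons e t ih =>
      simp only [pvBuckets, List.foldl_cons, pvInner] at *
      rw [ih]
      simp [pvLevel]

lemma pvInner_acc (ces : List (Int × Int × Int × Int)) (level : Int) (sk : List Int) :
    pvInner ces level sk = sk ++ pvInner ces level [] := by
  induction ces generalizing sk with
  | nil => simp [pvInner]
  | cons e t ih =>
      simp only [pvInner, List.foldl_cons] at *
      split_ifs with h
      · rw [ih (sk ++ [pvLevel e level]), ih ([] ++ [pvLevel e level]), List.append_assoc, List.nil_append]
      · exact ih sk

theorem sort_key_from_collation_elements_spec : Claim_equal_sort_key_from_collation_elements := by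
  intro ces _
  show sort_key_from_collation_elements ces = sort_key_from_collation_elements_alt ces
  have hb := pvBuckets_eq ces ([], [], [], [])
  simp only [pvBuckets] at hb
  simp only [sort_key_from_collation_elements, sort_key_from_collation_elements_alt, hb]
  have hr : PySem.List.pyRange 0 4 1 = [0, 1, 2, 3] := by decide
  rw [hr]
  simp only [List.foldl_cons, List.foldl_nil]
  norm_num
  rw [pvInner_acc ces 1, pvInner_acc ces 2, pvInner_acc ces 3]
  simp
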